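-- pv_equiv track=rewrite | github.com/tulip-control/dd | examples/what_is_a_bdd.py | let
-- ===== SOURCE A (Python) =====
-- def let(
--         values:
--             dict[str, bool],
--         bdd_ref:
--             int,
--         successors:
--             dict[
--                 int,
--                 tuple[
--                     int,
--                     int | None,
--                     int | None]],
--         level_to_var:
--             dict[
--                 int, str]
--         ) -> int:
--     """Recursively substitute values for variables.
--
--     Return a binary decision diagram that
--     represents the result of this substitution.
--
--     @param values:
--         assignment of Boolean values to
--         variable names
--     @param bdd_ref:
--         a node, key in successors
--     @param successors:
--         graph that stores nodes
--     @return: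
--         BDD node,
--         which is a key in `successors`
--     """
--     # leaf ?
--     if abs(bdd_ref) == 1:
--         return bdd_ref
--     # nonleaf node
--     key = abs(bdd_ref)
--     level, low, high = successors[key]
--     variable_name = level_to_var[level]
--     variable_value = values[variable_name]
--     if variable_value:
--         successor = high
--     else:
--         successor = low
--     result = let(
--         values, successor, successors,
--         level_to_var)
--     # copy sign
--     if bdd_ref < 0:
--         result = - result
--     return result
-- ===== SOURCE B (Python) =====
-- def let(values, bdd_ref, successors, level_to_var):
--     # Two staged passes: the assignment selects one outgoing edge per node
--     # (precomputed once into next_ref), then a pointer chase follows that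
--     # functional graph, flipping a running sign at complemented references.
--     if abs(bdd_ref) == 1:
--         return bdd_ref
--     next_ref = {
--         key: (high if values[level_to_var[level]] else low)
--         for key, (level, low, high) in successors.items()}
--     sign = 1
--     ref = bdd_ref
--     while abs(ref) != 1:
--         if ref < 0:
--             sign = -sign
--         ref = next_ref[abs(ref)]
--     return sign * ref
-- ===== Notes on version B (the rewrite author's own statement) =====
-- stated objective: alternative
-- what changed: Instead of A's recursive descent that looks up level/variable/value at each visited node and applies the sign on the way back up, B first collapses the BDD under the assignment into a functional graph (one precomputed selected child per node), then chases pointers iteratively with a running sign accumulator.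
-- outside the precondition, e.g. on let({'x': True}, 2, {2: (0, 1, 1), 3: (5, 1, 1)}, {0: 'x'}): A returns 1, B raises KeyError; on let({'x': True}, 2, {2: (0, 3, 1), 3: (0, 2, 1)}, {0: 'x'}): A returns 1, B returns 1
import Mathlib
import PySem

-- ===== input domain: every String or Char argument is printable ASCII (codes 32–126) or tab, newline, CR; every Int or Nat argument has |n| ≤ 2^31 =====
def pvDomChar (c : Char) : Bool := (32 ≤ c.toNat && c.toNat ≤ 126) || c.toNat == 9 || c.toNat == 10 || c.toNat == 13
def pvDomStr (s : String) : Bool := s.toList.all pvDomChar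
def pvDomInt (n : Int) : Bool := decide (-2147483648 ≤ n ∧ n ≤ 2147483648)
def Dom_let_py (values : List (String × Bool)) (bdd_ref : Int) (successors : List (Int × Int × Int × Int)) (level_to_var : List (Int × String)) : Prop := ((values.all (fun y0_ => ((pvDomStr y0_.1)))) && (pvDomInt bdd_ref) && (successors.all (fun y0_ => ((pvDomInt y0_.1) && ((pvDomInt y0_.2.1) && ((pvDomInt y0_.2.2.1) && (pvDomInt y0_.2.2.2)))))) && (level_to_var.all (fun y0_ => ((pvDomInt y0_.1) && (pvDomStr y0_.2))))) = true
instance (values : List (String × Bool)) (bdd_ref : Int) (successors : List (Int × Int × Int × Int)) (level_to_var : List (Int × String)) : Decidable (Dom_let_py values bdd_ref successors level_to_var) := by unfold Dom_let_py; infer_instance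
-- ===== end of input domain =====

-- B replaces A's recursive descent by two staged passes: precompute each node's
-- assignment-selected child once, then chase pointers with a running sign (objective: alternative).

-- ===== PORT A =====
-- A's recursion, with a fuel parameter making it total; under Pre_ (acyclic closed
-- graph) the fuel successors.length + 1 is never exhausted on admitted inputs.
def letARec (values : List (String × Bool)) (successors : List (Int × Int × Int × Int)) (level_to_var : List (Int × String)) : Nat → Int → Int
  | 0, _ => 0
  | fuel + 1, bdd_ref =>
    if |bdd_ref| = 1 then bdd_ref
    else
      match successors.lookup |bdd_ref| with
      | none => 0  -- KeyError in Python; excluded by Pre_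
      | some (level, low, high) =>
        match level_to_var.lookup level with
        | none => 0  -- KeyError; excluded by Pre_
        | some variable_name =>
          match values.lookup variable_name with
          | none => 0  -- KeyError; excluded by Pre_
          | some variable_value =>
            let successor := if variable_value then high else low
            let result := letARec values successors level_to_var fuel successor
            if bdd_ref < 0 then -result else result

def let_py (values : List (String × Bool)) (bdd_ref : Int) (successors : List (Int × Int × Int × Int)) (level_to_var : List (Int × String)) : Int :=
  letARec values successors level_to_var (successors.length + 1) bdd_ref

-- ===== PORT B =====
-- B's dict comprehension: one selected child per node.  The comprehension is
-- ported as a map over the entries; this is exact under Pre_, whose Nodup clause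
-- mirrors that `successors` is a Python dict (no duplicate keys).  The dict
-- lookups that would raise KeyError in Python are ported with defaults; Pre_
-- guarantees they all resolve.
def letBnext (values : List (String × Bool)) (successors : List (Int × Int × Int × Int)) (level_to_var : List (Int × String)) : List (Int × Int) :=
  successors.map (fun e =>
    (e.1, if ((values.lookup ((level_to_var.lookup e.2.1).getD "")).getD false) then e.2.2.2 else e.2.2.1))

-- B's while-loop: pointer chase with a running sign, fueled like A's recursion.
def letBWalk (next : List (Int × Int)) : Nat → Int → Int → Int
  | 0, _, _ => 0
  | fuel + 1, sign, ref =>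
    if |ref| = 1 then sign * ref
    else
      letBWalk next fuel (if ref < 0 then -sign else sign) ((next.lookup |ref|).getD 0)

def let_py_alt (values : List (String × Bool)) (bdd_ref : Int) (successors : List (Int × Int × Int × Int)) (level_to_var : List (Int × String)) : Int :=
  if |bdd_ref| = 1 then bdd_ref
  else letBWalk (letBnext values successors level_to_var) (successors.length + 1) 1 bdd_ref

-- ===== PRECONDITION & SPEC =====
-- Helpers for the acyclicity clause of Pre_: plain graph reachability on the keys.
def pvChildKeys (successors : List (Int × Int × Int × Int)) (k : Int) : List Int :=
  match successors.lookup k with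
  | none => []
  | some (_, low, high) =>
    (if |low| = 1 then [] else [|low|]) ++ (if |high| = 1 then [] else [|high|])

def pvReach (successors : List (Int × Int × Int × Int)) : Nat → List Int → List Int
  | 0, acc => acc
  | n + 1, acc => pvReach successors n ((acc ++ acc.flatMap (pvChildKeys successors)).dedup)

-- Pre_ admits every leaf reference outright; otherwise it demands what A's docstring
-- calls a BDD: the root key present, the graph closed (each non-leaf child a key) and
-- acyclic — exactly where Python A terminates without KeyError/RecursionError — every
-- level and variable resolvable (otherwise B's precomputation pass raises KeyError where
-- A, touching only one path, may return), and no duplicate keys in `successors` (it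
-- ports a Python dict; on duplicate assoc-list entries first-vs-last match is accidental).
def Pre_let_py (values : List (String × Bool)) (bdd_ref : Int) (successors : List (Int × Int × Int × Int)) (level_to_var : List (Int × String)) : Prop :=
  |bdd_ref| = 1 ∨
  (|bdd_ref| ∈ successors.map Prod.fst ∧
   (∀ e ∈ successors,
      (|e.2.2.1| = 1 ∨ |e.2.2.1| ∈ successors.map Prod.fst) ∧
      (|e.2.2.2| = 1 ∨ |e.2.2.2| ∈ successors.map Prod.fst) ∧
      e.2.1 ∈ level_to_var.map Prod.fst) ∧
   (∀ p ∈ level_to_var, p.2 ∈ values.map Prod.fst) ∧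
   (successors.map Prod.fst).Nodup ∧
   (∀ e ∈ successors, e.1 ∉ pvReach successors successors.length (pvChildKeys successors e.1)))
instance (values : List (String × Bool)) (bdd_ref : Int) (successors : List (Int × Int × Int × Int)) (level_to_var : List (Int × String)) : Decidable (Pre_let_py values bdd_ref successors level_to_var) := by unfold Pre_let_py; infer_instance

def pvWitness_let_py : (List (String × Bool)) × Int × (List (Int × Int × Int × Int)) × (List (Int × String)) :=
  ([("x", true)], 2, [(2, 0, 1, -1)], [(0, "x")])

def Spec_let_py (values : List (String × Bool)) (bdd_ref : Int) (successors : List (Int × Int × Int × Int)) (level_to_var : List (Int × String)) (out : Int) : Prop := out = let_py_alt values bdd_ref successors level_to_var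
instance (values : List (String × Bool)) (bdd_ref : Int) (successors : List (Int × Int × Int × Int)) (level_to_var : List (Int × String)) (out : Int) : Decidable (Spec_let_py values bdd_ref successors level_to_var out) := by unfold Spec_let_py; infer_instance

-- ===== CLAIM (what is proved, stated in full; the proofs are below) =====
def Claim_equal_let_py : Prop := ∀ (values : List (String × Bool)) (bdd_ref : Int) (successors : List (Int × Int × Int × Int)) (level_to_var : List (Int × String)), Dom_let_py values bdd_ref successors level_to_var → Pre_let_py values bdd_ref successors level_to_var → Spec_let_py values bdd_ref successors level_to_var (let_py values bdd_ref successors level_to_var)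

-- ===== LEMMAS AND PROOFS =====

theorem lookup_eq_find? {β : Type} (l : List (Int × β)) (k : Int) :
    l.lookup k = (l.find? (fun e => k == e.1)).map Prod.snd := by
  induction l with
  | nil => rfl
  | cons hd tl ih =>
    by_cases h : k == hd.1
    · simp [List.lookup, List.find?, h]
    · simp only [List.lookup, List.find?]
      rw [show (k == hd.1) = false by simpa using h]
      simpa using ih

theorem lookup_map_fst {β : Type} (g : Int × β → Int) (l : List (Int × β)) (k : Int) :
    List.lookup k (l.map (fun e => (e.1, g e))) = (l.find? (fun e => k == e.1)).map g := by
  induction l with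
  | nil => rfl
  | cons hd tl ih =>
    by_cases h : k == hd.1
    · simp [List.lookup, List.find?, h]
    · simp only [List.map, List.lookup, List.find?]
      rw [show (k == hd.1) = false by simpa using h]
      simpa using ih

theorem mem_keys_lookup {β : Type} (l : List (Int × β)) (k : Int)
    (h : k ∈ l.map Prod.fst) : ∃ v, l.lookup k = some v := by
  induction l with
  | nil => simp at h
  | cons hd tl ih =>
    by_cases hk : k = hd.1
    · exact ⟨hd.2, by simp [List.lookup, hk]⟩
    · have : k ∈ tl.map Prod.fst := by
        simp only [List.map, List.mem_cons] at h
        tauto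
      obtain ⟨v, hv⟩ := ih this
      have hk' : (k == hd.1) = false := by simpa using hk
      exact ⟨v, by simp [List.lookup, hk', hv]⟩

theorem lookup_mem {β : Type} (l : List (Int × β)) (k : Int) (v : β)
    (h : l.lookup k = some v) : (k, v) ∈ l := by
  induction l with
  | nil => simp [List.lookup] at h
  | cons hd tl ih =>
    obtain ⟨a, c⟩ := hd
    by_cases hk : k == a
    · simp only [List.lookup, hk] at h
      have h1 : k = a := by simpa using hk
      have h2 : v = c := by simpa using h.symm
      simp [h1, h2]
    · have hk' : (k == a) = false := by simpa using hk
      simp only [List.lookup, hk'] at h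
      exact List.mem_cons_of_mem _ (ih h)

theorem lookup_mem_str {β : Type} (l : List (Int × β)) (k : Int)
    (h : k ∈ l.map Prod.fst) : ∃ v, l.lookup k = some v ∧ (k, v) ∈ l := by
  obtain ⟨v, hv⟩ := mem_keys_lookup l k h
  exact ⟨v, hv, lookup_mem l k v hv⟩

theorem mem_keys_lookup' (l : List (String × Bool)) (k : String)
    (h : k ∈ l.map Prod.fst) : ∃ v, l.lookup k = some v := by
  induction l with
  | nil => simp at h
  | cons hd tl ih =>
    by_cases hk : k = hd.1
    · exact ⟨hd.2, by simp [List.lookup, hk]⟩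
    · have : k ∈ tl.map Prod.fst := by
        simp only [List.map, List.mem_cons] at h
        tauto
      obtain ⟨v, hv⟩ := ih this
      refine ⟨v, ?_⟩
      have : (k == hd.1) = false := by simpa using hk
      simp [List.lookup, this, hv]

-- Main invariant: with all lookups resolvable and the graph closed, B's fueled
-- pointer chase with accumulated sign equals sign times A's fueled recursion.
theorem letBWalk_eq (values : List (String × Bool)) (successors : List (Int × Int × Int × Int)) (level_to_var : List (Int × String))
    (Hc : ∀ e ∈ successors,
      (|e.2.2.1| = 1 ∨ |e.2.2.1| ∈ successors.map Prod.fst) ∧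
      (|e.2.2.2| = 1 ∨ |e.2.2.2| ∈ successors.map Prod.fst) ∧
      e.2.1 ∈ level_to_var.map Prod.fst)
    (Hv : ∀ p ∈ level_to_var, p.2 ∈ values.map Prod.fst) :
    ∀ (fuel : Nat) (sign ref : Int),
      (|ref| = 1 ∨ |ref| ∈ successors.map Prod.fst) →
      letBWalk (letBnext values successors level_to_var) fuel sign ref
        = sign * letARec values successors level_to_var fuel ref := by
  intro fuel
  induction fuel with
  | zero => intro sign ref _; simp [letBWalk, letARec]
  | succ n ih =>
    intro sign ref href
    simp only [letBWalk, letARec]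
    by_cases h1 : |ref| = 1
    · simp [h1]
    · simp only [h1, if_false]
      have hmem : |ref| ∈ successors.map Prod.fst := href.resolve_left h1
      obtain ⟨v, hs, hvmem⟩ := lookup_mem_str successors |ref| hmem
      obtain ⟨level, low, high⟩ := v
      -- identify the entry the map-lookup finds with the one lookup finds
      have hs' := hs
      rw [lookup_eq_find?] at hs'
      obtain ⟨e, hfind, hsnd⟩ := Option.map_eq_some_iff.mp hs'
      have hememb : e ∈ successors := List.mem_of_find?_eq_some hfind
      obtain ⟨_, _, hlev⟩ := Hc e hememb
      obtain ⟨name, hl, hlmem⟩ := lookup_mem_str level_to_var e.2.1 hlev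
      obtain ⟨b, hvv⟩ := mem_keys_lookup' values name (Hv _ hlmem)
      have hnext : (letBnext values successors level_to_var).lookup |ref|
          = some (if b then e.2.2.2 else e.2.2.1) := by
        simp only [letBnext]
        rw [lookup_map_fst (fun e => if ((values.lookup ((level_to_var.lookup e.2.1).getD "")).getD false) then e.2.2.2 else e.2.2.1) successors |ref|]
        simp [hfind, hl, hvv]
      have hsucc : successors.lookup |ref| = some (e.2.1, e.2.2.1, e.2.2.2) := by
        rw [hs, ← hsnd]
      rw [hsucc, hnext]
      have hl' : level_to_var.lookup e.2.1 = some name := hl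
      simp only [hl', hvv, Option.getD_some]
      have hchild : (|if b then e.2.2.2 else e.2.2.1| = 1 ∨
          |if b then e.2.2.2 else e.2.2.1| ∈ successors.map Prod.fst) := by
        obtain ⟨c1, c2, _⟩ := Hc e hememb
        cases b
        · rw [if_neg (by simp)]; exact c1
        · rw [if_pos rfl]; exact c2
      rw [ih _ _ hchild]
      by_cases hneg : ref < 0
      · simp only [hneg, if_true]; ring
      · simp only [hneg, if_false]

-- ===== VERDICT (by name: the statement is the Claim_ definition above) =====
theorem let_py_spec : Claim_equal_let_py := by
  intro values bdd_ref successors level_to_var _ hpre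
  unfold Spec_let_py let_py let_py_alt
  by_cases h1 : |bdd_ref| = 1
  · simp [letARec, h1]
  · simp only [h1, if_false]
    rcases hpre with h | ⟨hroot, Hc, Hv, _, _⟩
    · exact absurd h h1
    · rw [letBWalk_eq values successors level_to_var Hc Hv _ _ _ (Or.inr hroot), one_mul]
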